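-- pv_equiv track=rewrite | github.com/adshidtadka/scitit-learn | src/python/dtw_15.py | make_ev
-- ===== SOURCE A (Python) =====
-- def make_ev(num):
--     """連番からevset, evnoをつくる."""
--     counter = 0
--     while((num + 1) % 30 != 0):
--         num += 1
--         counter += 1
--     evset = int((num + 1) / 30)
--     evno = int(30 - counter)
--     return str(evset).zfill(2) + "_" + str(evno).zfill(2)
-- ===== SOURCE B (Python) =====
-- def make_ev(num):
--     """連番からevset, evnoをつくる."""
--     q, r = divmod(num, 30)
--     return str(q + 1).zfill(2) + "_" + str(r + 1).zfill(2)
-- ===== Notes on version B (the rewrite author's own statement) =====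
-- stated objective: simpler
-- what changed: Replaces the round-up-to-multiple-of-30 while-loop and float division with a single divmod(num, 30) closed form.
import Mathlib
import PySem

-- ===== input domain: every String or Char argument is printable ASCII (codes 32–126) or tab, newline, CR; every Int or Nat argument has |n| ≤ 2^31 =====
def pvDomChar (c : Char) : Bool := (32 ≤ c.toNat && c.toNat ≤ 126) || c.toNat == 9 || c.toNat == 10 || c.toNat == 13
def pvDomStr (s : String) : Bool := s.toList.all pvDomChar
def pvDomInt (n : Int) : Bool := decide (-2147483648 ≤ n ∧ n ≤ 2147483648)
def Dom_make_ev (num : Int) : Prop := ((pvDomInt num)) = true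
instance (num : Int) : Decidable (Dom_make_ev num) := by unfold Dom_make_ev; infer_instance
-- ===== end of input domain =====

-- B replaces A's round-up while-loop and float division with a single divmod closed form (objective: simpler).

-- ===== PORT A =====
-- The while-loop runs at most 29 iterations (it stops once (num+1) % 30 == 0),
-- so a fuel of 30 makes the recursion total without changing the computation.
def make_ev_loop (num counter : Int) : Nat → Int × Int
  | 0 => (num, counter)
  | fuel + 1 =>
    if PySem.Int.mod (num + 1) 30 ≠ 0 then
      make_ev_loop (num + 1) (counter + 1) fuel
    else (num, counter)

def make_ev (num : Int) : String :=
  let (num', counter) := make_ev_loop num 0 30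
  -- int((num'+1)/30): after the loop num'+1 is an exact multiple of 30 and, on Dom,
  -- small enough that Python's float division is exact, so this equals floor division.
  let evset := PySem.Int.floordiv (num' + 1) 30
  let evno := 30 - counter
  PySem.Str.zfill (PySem.Int.toStr evset) 2 ++ "_" ++ PySem.Str.zfill (PySem.Int.toStr evno) 2

-- ===== PORT B =====
def make_ev_alt (num : Int) : String :=
  let q := PySem.Int.floordiv num 30
  let r := PySem.Int.mod num 30
  PySem.Str.zfill (PySem.Int.toStr (q + 1)) 2 ++ "_" ++ PySem.Str.zfill (PySem.Int.toStr (r + 1)) 2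

-- ===== PRECONDITION & SPEC =====
def Spec_make_ev (num : Int) (out : String) : Prop := out = make_ev_alt num
instance (num : Int) (out : String) : Decidable (Spec_make_ev num out) := by unfold Spec_make_ev; infer_instance

-- ===== CLAIM (what is proved, stated in full; the proofs are below) =====
def Claim_equal_make_ev : Prop := ∀ (num : Int), Dom_make_ev num → Spec_make_ev num (make_ev num)

-- ===== LEMMAS AND PROOFS =====

-- The loop adds d = 29 - (num % 30) to both components, given enough fuel.
theorem make_ev_loop_eq (fuel : Nat) (num counter : Int)
    (h : 29 - num % 30 ≤ (fuel : Int)) :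
    make_ev_loop num counter fuel = (num + (29 - num % 30), counter + (29 - num % 30)) := by
  induction fuel generalizing num counter with
  | zero =>
    have h1 := Int.emod_lt_of_pos num (by norm_num : (0:Int) < 30)
    have h29 : (29 : Int) - num % 30 = 0 := by omega
    simp [make_ev_loop, h29]
  | succ n ih =>
    simp only [make_ev_loop]
    rw [PySem.Int.mod_eq_emod_of_pos (by norm_num)]
    by_cases hc : (num + 1) % 30 = 0
    · rw [if_neg (not_not_intro hc)]
      have h29 : num % 30 = 29 := by omega
      rw [h29]
      norm_num
    · have hr : (num + 1) % 30 = num % 30 + 1 := by omega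
      have hcast : ((n + 1 : Nat) : Int) = (n : Int) + 1 := by push_cast; ring
      rw [if_pos hc, ih (num + 1) (counter + 1) (by rw [hr]; rw [hcast] at h; omega)]
      simp only [hr, Prod.mk.injEq]
      constructor <;> ring

theorem make_ev_eq_alt (num : Int) : make_ev num = make_ev_alt num := by
  have h0 := Int.emod_nonneg num (by norm_num : (30:Int) ≠ 0)
  have h1 := Int.emod_lt_of_pos num (by norm_num : (0:Int) < 30)
  unfold make_ev make_ev_alt
  rw [make_ev_loop_eq 30 num 0 (by omega)]
  simp only [PySem.Int.floordiv_eq_ediv_of_pos (by norm_num : (0:Int) < 30),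
    PySem.Int.mod_eq_emod_of_pos (by norm_num : (0:Int) < 30)]
  have hs : (num + (29 - num % 30) + 1) = (num / 30 + 1) * 30 := by omega
  rw [hs, Int.mul_ediv_cancel _ (by norm_num : (30:Int) ≠ 0)]
  have : (30 : Int) - (0 + (29 - num % 30)) = num % 30 + 1 := by ring
  rw [this]

-- ===== VERDICT (by name: the statement is the Claim_ definition above) =====
theorem make_ev_spec : Claim_equal_make_ev := by
  intro num _
  unfold Spec_make_ev
  exact make_ev_eq_alt num
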